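-- pv_equiv track=rewrite | github.com/orginos/jaxQFT | scripts/mcmc/mcmc.py | _cli_bool
-- ===== SOURCE A (Python) =====
-- from typing import Any, Dict, List, Mapping, Optional, Tuple
--
-- def _cli_bool(argv: List[str], on_flag: str, off_flag: str):
--     val = None
--     for a in argv:
--         if a == on_flag:
--             val = True
--         elif a == off_flag:
--             val = False
--     return val
-- ===== SOURCE B (Python) =====
-- def _cli_bool(argv, on_flag, off_flag):
--     for a in reversed(argv):
--         if a == on_flag:
--             return True
--         if a == off_flag:
--             return False
--     return None
-- ===== Notes on version B (the rewrite author's own statement) =====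
-- stated objective: simpler
-- what changed: B scans argv from the back and returns at the first flag hit (on_flag checked before off_flag, preserving A's elif precedence), instead of running an accumulator over the whole list to keep the last assignment.
import Mathlib
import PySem

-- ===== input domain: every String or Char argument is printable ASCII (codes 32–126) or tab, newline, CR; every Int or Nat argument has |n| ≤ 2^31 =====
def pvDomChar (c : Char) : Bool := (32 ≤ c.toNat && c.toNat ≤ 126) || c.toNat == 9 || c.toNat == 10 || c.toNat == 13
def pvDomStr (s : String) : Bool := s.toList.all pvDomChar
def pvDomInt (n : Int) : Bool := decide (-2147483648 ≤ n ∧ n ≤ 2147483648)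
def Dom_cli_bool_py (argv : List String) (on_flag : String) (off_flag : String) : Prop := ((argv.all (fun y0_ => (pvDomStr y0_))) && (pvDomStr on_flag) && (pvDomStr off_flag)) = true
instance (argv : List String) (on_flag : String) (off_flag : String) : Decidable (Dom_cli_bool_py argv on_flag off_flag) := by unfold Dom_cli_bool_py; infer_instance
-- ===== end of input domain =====

-- B scans argv from the back and returns at the first flag hit instead of folding an
-- accumulator over the whole list (objective: simpler; same behaviour, early exit).

-- ===== PORT A =====
-- literal port of A: accumulator val, updated left to right
def cli_bool_py (argv : List String) (on_flag : String) (off_flag : String) : Option Bool :=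
  argv.foldl (fun val a =>
    if a = on_flag then some true
    else if a = off_flag then some false
    else val) none

-- ===== PORT B =====
-- first match from the back, on_flag checked first
def cliBoolFirst (on_flag off_flag : String) : List String → Option Bool
  | [] => none
  | a :: rest =>
    if a = on_flag then some true
    else if a = off_flag then some false
    else cliBoolFirst on_flag off_flag rest

def cli_bool_py_alt (argv : List String) (on_flag : String) (off_flag : String) : Option Bool :=
  cliBoolFirst on_flag off_flag argv.reverse

-- ===== PRECONDITION & SPEC =====
def Spec_cli_bool_py (argv : List String) (on_flag : String) (off_flag : String) (out : Option Bool) : Prop := out = cli_bool_py_alt argv on_flag off_flag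
instance (argv : List String) (on_flag : String) (off_flag : String) (out : Option Bool) : Decidable (Spec_cli_bool_py argv on_flag off_flag out) := by unfold Spec_cli_bool_py; infer_instance

-- ===== CLAIM (what is proved, stated in full; the proofs are below) =====
def Claim_equal_cli_bool_py : Prop := ∀ (argv : List String) (on_flag : String) (off_flag : String), Dom_cli_bool_py argv on_flag off_flag → Spec_cli_bool_py argv on_flag off_flag (cli_bool_py argv on_flag off_flag)

-- ===== LEMMAS AND PROOFS =====

theorem cliBoolFirst_append (on off : String) (xs ys : List String) :
    cliBoolFirst on off (xs ++ ys)
      = match cliBoolFirst on off xs with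
        | some b => some b
        | none => cliBoolFirst on off ys := by
  induction xs with
  | nil => simp [cliBoolFirst]
  | cons a t ih =>
    simp only [List.cons_append, cliBoolFirst]
    split_ifs <;> simp [ih]

theorem cli_bool_foldl_eq (on off : String) (l : List String) (v : Option Bool) :
    l.foldl (fun val a =>
      if a = on then some true else if a = off then some false else val) v
      = match cliBoolFirst on off l.reverse with
        | some b => some b
        | none => v := by
  induction l generalizing v with
  | nil => simp [cliBoolFirst]
  | cons a t ih =>
    simp only [List.foldl_cons, List.reverse_cons, cliBoolFirst_append, ih]
    cases cliBoolFirst on off t.reverse with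
    | some b => rfl
    | none => simp only [cliBoolFirst]; split_ifs <;> rfl

-- ===== VERDICT (by name: the statement is the Claim_ definition above) =====
theorem cli_bool_py_spec : Claim_equal_cli_bool_py := by
  intro argv on off _
  unfold Spec_cli_bool_py cli_bool_py cli_bool_py_alt
  rw [cli_bool_foldl_eq]
  cases cliBoolFirst on off argv.reverse <;> rfl
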